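-- pv_equiv track=rewrite | github.com/erachi/hospitality-hq | src/task_handler.py | _match_property
-- ===== SOURCE A (Python) =====
-- from typing import Callable, Optional
--
-- def _match_property(arg: str, properties: list[dict]) -> Optional[dict]:
--     arg = arg.lower()
--     for p in properties:
--         slug = (p.get("slug") or "").lower()
--         name = (p.get("name") or "").lower()
--         if slug == arg or name == arg:
--             return p
--     # Prefix match on name or slug
--     for p in properties:
--         slug = (p.get("slug") or "").lower()
--         name = (p.get("name") or "").lower()
--         if slug.startswith(arg) or name.startswith(arg):
--             return p
--     return None
-- ===== SOURCE B (Python) =====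
-- from typing import Optional
--
-- def _match_property(arg: str, properties: list[dict]) -> Optional[dict]:
--     arg = arg.lower()
--     candidate = None
--     for p in properties:
--         slug = (p.get("slug") or "").lower()
--         name = (p.get("name") or "").lower()
--         if slug == arg or name == arg:
--             return p
--         if candidate is None and (slug.startswith(arg) or name.startswith(arg)):
--             candidate = p
--     return candidate
-- ===== Notes on version B (the rewrite author's own statement) =====
-- stated objective: simpler
-- what changed: Replaced A's two full passes (exact pass, then prefix pass) by a single pass that returns immediately on an exact match and remembers the first prefix candidate in a local variable.
import Mathlib
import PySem

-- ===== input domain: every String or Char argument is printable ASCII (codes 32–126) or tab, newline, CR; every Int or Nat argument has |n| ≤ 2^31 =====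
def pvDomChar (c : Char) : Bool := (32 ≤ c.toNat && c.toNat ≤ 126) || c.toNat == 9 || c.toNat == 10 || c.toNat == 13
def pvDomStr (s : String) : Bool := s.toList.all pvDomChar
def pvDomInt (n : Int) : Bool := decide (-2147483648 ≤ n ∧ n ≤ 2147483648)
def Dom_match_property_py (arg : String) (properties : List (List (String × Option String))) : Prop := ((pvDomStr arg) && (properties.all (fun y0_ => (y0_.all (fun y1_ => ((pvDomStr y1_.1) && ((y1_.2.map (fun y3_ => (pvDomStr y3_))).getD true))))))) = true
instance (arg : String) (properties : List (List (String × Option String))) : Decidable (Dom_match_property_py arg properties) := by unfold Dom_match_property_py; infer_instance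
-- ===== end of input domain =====

-- B replaces A's two full passes by one pass that records the first prefix candidate (objective: simpler).
-- ===== PORT A =====
-- p.get(k): first-match lookup in the association list; (v or "").lower()
def pvGetLower (p : List (String × Option String)) (k : String) : String :=
  PySem.Str.lower ((((p.find? (fun kv => kv.1 == k)).map Prod.snd).getD none).getD "")

def mpA_exact (a : String) : List (List (String × Option String)) → Option (List (String × Option String))
  | [] => none
  | p :: rest =>
    if pvGetLower p "slug" == a || pvGetLower p "name" == a then some p
    else mpA_exact a rest

def mpA_prefix (a : String) : List (List (String × Option String)) → Option (List (String × Option String))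
  | [] => none
  | p :: rest =>
    if PySem.Str.startswith (pvGetLower p "slug") a || PySem.Str.startswith (pvGetLower p "name") a then some p
    else mpA_prefix a rest

def match_property_py (arg : String) (properties : List (List (String × Option String))) : Option (List (String × Option String)) :=
  let a := PySem.Str.lower arg
  match mpA_exact a properties with
  | some p => some p
  | none => mpA_prefix a properties

-- ===== PORT B =====
def mpB_loop (a : String) (cand : Option (List (String × Option String))) : List (List (String × Option String)) → Option (List (String × Option String))
  | [] => cand
  | p :: rest =>
    let slug := pvGetLower p "slug"
    let name := pvGetLower p "name"
    if slug == a || name == a then some p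
    else if cand.isNone && (PySem.Str.startswith slug a || PySem.Str.startswith name a) then
      mpB_loop a (some p) rest
    else mpB_loop a cand rest

def match_property_py_alt (arg : String) (properties : List (List (String × Option String))) : Option (List (String × Option String)) :=
  mpB_loop (PySem.Str.lower arg) none properties

-- ===== PRECONDITION & SPEC =====
def Spec_match_property_py (arg : String) (properties : List (List (String × Option String))) (out : Option (List (String × Option String))) : Prop := out = match_property_py_alt arg properties
instance (arg : String) (properties : List (List (String × Option String))) (out : Option (List (String × Option String))) : Decidable (Spec_match_property_py arg properties out) := by unfold Spec_match_property_py; infer_instance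

-- ===== CLAIM (what is proved, stated in full; the proofs are below) =====
def Claim_equal_match_property_py : Prop := ∀ (arg : String) (properties : List (List (String × Option String))), Dom_match_property_py arg properties → Spec_match_property_py arg properties (match_property_py arg properties)

-- ===== LEMMAS AND PROOFS =====
theorem mpA_exact_cons (a : String) (p : List (String × Option String)) (rest : List (List (String × Option String))) :
    mpA_exact a (p :: rest) =
      if (pvGetLower p "slug" == a || pvGetLower p "name" == a) = true then some p
      else mpA_exact a rest := rfl

theorem mpA_prefix_cons (a : String) (p : List (String × Option String)) (rest : List (List (String × Option String))) :
    mpA_prefix a (p :: rest) =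
      if (PySem.Str.startswith (pvGetLower p "slug") a || PySem.Str.startswith (pvGetLower p "name") a) = true then some p
      else mpA_prefix a rest := rfl

theorem mpB_loop_cons (a : String) (cand : Option (List (String × Option String)))
    (p : List (String × Option String)) (rest : List (List (String × Option String))) :
    mpB_loop a cand (p :: rest) =
      if (pvGetLower p "slug" == a || pvGetLower p "name" == a) = true then some p
      else if (cand.isNone && (PySem.Str.startswith (pvGetLower p "slug") a || PySem.Str.startswith (pvGetLower p "name") a)) = true then
        mpB_loop a (some p) rest
      else mpB_loop a cand rest := rfl

theorem mpB_loop_eq (a : String) (cand : Option (List (String × Option String)))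
    (props : List (List (String × Option String))) :
    mpB_loop a cand props =
      match mpA_exact a props with
      | some p => some p
      | none => match cand with
        | some c => some c
        | none => mpA_prefix a props := by
  induction props generalizing cand with
  | nil => cases cand <;> simp [mpB_loop, mpA_exact, mpA_prefix]
  | cons p rest ih =>
    rw [mpB_loop_cons, mpA_exact_cons]
    by_cases hex : (pvGetLower p "slug" == a || pvGetLower p "name" == a) = true
    · rw [if_pos hex, if_pos hex]
    · rw [if_neg hex, if_neg hex]
      cases cand with
      | some c => rw [if_neg (by simp), ih]
      | none =>
        by_cases hpre : (PySem.Str.startswith (pvGetLower p "slug") a || PySem.Str.startswith (pvGetLower p "name") a) = true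
        · rw [if_pos (by simpa using hpre), ih, mpA_prefix_cons, if_pos hpre]
        · rw [if_neg (by simpa using hpre), ih, mpA_prefix_cons, if_neg hpre]

-- ===== VERDICT (by name: the statement is the Claim_ definition above) =====
theorem match_property_py_spec : Claim_equal_match_property_py := by
  intro arg properties _
  unfold Spec_match_property_py match_property_py match_property_py_alt
  rw [mpB_loop_eq]
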